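-- pv_equiv track=rewrite | github.com/Z321T/luminoedu-loongarch64 | server/app/services/chat_svc.py | get_chat_preview
-- ===== SOURCE A (Python) =====
-- from typing import List, Dict, Any, Optional, AsyncGenerator
--
-- def get_chat_preview(messages: List[Dict[str, str]]) -> str:
--     """获取聊天预览文本"""
--     if not messages:
--         return "新对话"
--
--     # 优先显示用户的第一条消息
--     for msg in messages:
--         if msg.get("role") == "user":
--             content = msg.get("content", "").strip()
--             if content:
--                 return content[:50] + ("..." if len(content) > 50 else "")
--
--     # 如果没有用户消息，找第一条有内容的消息
--     for msg in messages:
--         content = msg.get("content", "").strip()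
--         if content:
--             return content[:50] + ("..." if len(content) > 50 else "")
--
--     return "新对话"
-- ===== SOURCE B (Python) =====
-- def get_chat_preview(messages):
--     """获取聊天预览文本 — single pass instead of two scans."""
--     first_nonempty = None
--     for msg in messages:
--         content = msg.get("content", "").strip()
--         if msg.get("role") == "user" and content:
--             return content[:50] + ("..." if len(content) > 50 else "")
--         if content and first_nonempty is None:
--             first_nonempty = content
--     if first_nonempty is not None:
--         return first_nonempty[:50] + ("..." if len(first_nonempty) > 50 else "")
--     return "新对话"
-- ===== Notes on version B (the rewrite author's own statement) =====
-- stated objective: alternative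
-- what changed: Two sequential scans (first-user-with-content, then first-with-content) replaced by one pass that returns a user message immediately and remembers the first nonempty content in an accumulator for the fallback.
import Mathlib
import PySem

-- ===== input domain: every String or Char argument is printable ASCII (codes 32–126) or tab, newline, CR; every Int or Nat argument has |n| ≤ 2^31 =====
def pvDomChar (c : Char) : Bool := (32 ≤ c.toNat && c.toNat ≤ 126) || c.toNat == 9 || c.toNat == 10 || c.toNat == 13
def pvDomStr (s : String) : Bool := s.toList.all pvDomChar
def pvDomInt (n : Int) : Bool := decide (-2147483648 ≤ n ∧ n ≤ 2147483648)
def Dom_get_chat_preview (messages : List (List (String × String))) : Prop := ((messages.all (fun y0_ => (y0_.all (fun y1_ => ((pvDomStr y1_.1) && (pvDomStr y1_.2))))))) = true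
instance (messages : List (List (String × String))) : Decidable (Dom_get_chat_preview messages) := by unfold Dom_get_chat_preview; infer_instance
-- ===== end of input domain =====

-- B does the same job in one pass (user message returned immediately, first nonempty content kept in an accumulator) instead of A's two sequential scans; same result.

-- shared formatting of one Python expression: content[:50] + ("..." if len(content) > 50 else "")
def pvFmt (c : String) : String :=
  PySem.Str.slice c none (some 50) ++ (if PySem.Str.len c > 50 then "..." else "")

-- msg.get("content", "").strip()
def pvContent (msg : List (String × String)) : String :=
  PySem.Str.strip (PySem.Dict.getD (PySem.Dict.mk msg) "content" "")

-- ===== PORT A =====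
-- A's first loop: first message with role == "user" and nonempty stripped content
def pvLoopA1 : List (List (String × String)) → Option String
  | [] => none
  | msg :: rest =>
    if PySem.Dict.get? (PySem.Dict.mk msg) "role" = some "user" then
      let c := pvContent msg
      if c ≠ "" then some (pvFmt c) else pvLoopA1 rest
    else pvLoopA1 rest

-- A's second loop: first message with nonempty stripped content
def pvLoopA2 : List (List (String × String)) → Option String
  | [] => none
  | msg :: rest =>
    let c := pvContent msg
    if c ≠ "" then some (pvFmt c) else pvLoopA2 rest

def get_chat_preview (messages : List (List (String × String))) : String :=
  if messages = [] then "新对话"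
  else
    match pvLoopA1 messages with
    | some r => r
    | none =>
      match pvLoopA2 messages with
      | some r => r
      | none => "新对话"

-- ===== PORT B =====
-- single pass with accumulator first_nonempty
def pvLoopB : List (List (String × String)) → Option String → String
  | [], none => "新对话"
  | [], some c => pvFmt c
  | msg :: rest, acc =>
    let c := pvContent msg
    if PySem.Dict.get? (PySem.Dict.mk msg) "role" = some "user" ∧ c ≠ "" then pvFmt c
    else pvLoopB rest (if c ≠ "" ∧ acc = none then some c else acc)

def get_chat_preview_alt (messages : List (List (String × String))) : String :=
  pvLoopB messages none

-- ===== PRECONDITION & SPEC =====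
def Spec_get_chat_preview (messages : List (List (String × String))) (out : String) : Prop := out = get_chat_preview_alt messages
instance (messages : List (List (String × String))) (out : String) : Decidable (Spec_get_chat_preview messages out) := by unfold Spec_get_chat_preview; infer_instance

-- ===== CLAIM (what is proved, stated in full; the proofs are below) =====
def Claim_equal_get_chat_preview : Prop := ∀ (messages : List (List (String × String))), Dom_get_chat_preview messages → Spec_get_chat_preview messages (get_chat_preview messages)

-- ===== LEMMAS AND PROOFS =====

-- loop invariant: B's single pass equals A's first scan, falling back to the
-- accumulator (the earliest nonempty content so far), then A's second scan.
theorem pvLoopB_eq (ms : List (List (String × String))) (acc : Option String) :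
    pvLoopB ms acc =
      (pvLoopA1 ms).getD
        (match acc with
         | some c => pvFmt c
         | none => (pvLoopA2 ms).getD "新对话") := by
  induction ms generalizing acc with
  | nil => cases acc <;> simp [pvLoopB, pvLoopA1, pvLoopA2]
  | cons msg rest ih =>
    by_cases hu : PySem.Dict.get? (PySem.Dict.mk msg) "role" = some "user" <;>
    by_cases hc : pvContent msg ≠ "" <;>
    cases acc <;>
    simp [pvLoopB, pvLoopA1, pvLoopA2, hu, hc, ih]

theorem get_chat_preview_eq (messages : List (List (String × String))) :
    get_chat_preview messages = get_chat_preview_alt messages := by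
  unfold get_chat_preview get_chat_preview_alt
  rw [pvLoopB_eq]
  cases messages with
  | nil => simp [pvLoopA1, pvLoopA2]
  | cons m rest =>
    simp only [if_neg (List.cons_ne_nil m rest)]
    cases pvLoopA1 (m :: rest) <;> cases pvLoopA2 (m :: rest) <;> simp

-- ===== VERDICT (by name: the statement is the Claim_ definition above) =====
theorem get_chat_preview_spec : Claim_equal_get_chat_preview := by
  intro messages _
  unfold Spec_get_chat_preview
  exact get_chat_preview_eq messages
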